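-- pv_equiv track=rewrite | github.com/dn7638/codetree-TILs | 240331/루돌프의 반란/rudolph-rebellion.py | R_direction
-- ===== SOURCE A (Python) =====
-- moveR = [[-1, -1], [-1, 0], [-1, 1], [0, 1], [1, 1], [1, 0], [1, -1], [0, -1]]
--
-- def R_direction(S_r, S_c, R_r, R_c):
--     temp = []
--     for dr, dc in moveR:
--         if R_r + dr - S_r == 0 and R_c + dc - S_c == 0:
--             temp.append([0, dr, dc])
--         else:
--             temp.append([-pow(R_r + dr - S_r, 2) - pow(R_c + dc - S_c, 2), dr, dc])
--     return max(temp)[1:3]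
-- ===== SOURCE B (Python) =====
-- def R_direction(S_r, S_c, R_r, R_c):
--     dr = (S_r > R_r) - (S_r < R_r)
--     dc = (S_c > R_c) - (S_c < R_c)
--     return [dr, dc] if dr or dc else [1, 0]
-- ===== Notes on version B (the rewrite author's own statement) =====
-- stated objective: simpler
-- what changed: Replaced the 8-way candidate loop, list building and lexicographic max scan with a closed-form per-coordinate sign computation (with [1,0] in the on-Santa tie case).
import Mathlib
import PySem

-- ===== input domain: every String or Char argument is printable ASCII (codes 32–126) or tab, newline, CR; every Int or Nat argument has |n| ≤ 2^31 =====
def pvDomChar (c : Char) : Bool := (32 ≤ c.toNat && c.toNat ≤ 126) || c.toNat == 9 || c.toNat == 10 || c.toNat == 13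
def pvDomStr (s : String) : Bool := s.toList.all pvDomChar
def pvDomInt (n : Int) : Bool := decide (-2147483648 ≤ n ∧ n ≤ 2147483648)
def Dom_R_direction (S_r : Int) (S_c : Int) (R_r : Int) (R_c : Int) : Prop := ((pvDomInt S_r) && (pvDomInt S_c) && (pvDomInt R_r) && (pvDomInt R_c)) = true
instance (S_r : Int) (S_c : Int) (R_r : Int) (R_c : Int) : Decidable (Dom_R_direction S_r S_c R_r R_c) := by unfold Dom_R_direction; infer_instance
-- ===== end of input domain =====

-- B replaces A's 8-candidate loop + lexicographic max scan with a closed-form per-coordinate sign computation (simpler).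

-- ===== PORT A =====
-- Python's `xs < ys` on lists of ints: lexicographic; exact transcription of CPython's rule.
def listLt : List Int → List Int → Bool
  | [], [] => false
  | [], _ :: _ => true
  | _ :: _, [] => false
  | a :: as, b :: bs => if a < b then true else if b < a then false else listLt as bs

-- one step of Python's built-in max over a list: keep the first maximal element
def pickMax (acc y : List Int) : List Int := if listLt acc y then y else acc

-- Python's max(l) for a list of int-lists; [] is unreachable in A (max of empty would raise)
def pyMax (l : List (List Int)) : List Int :=
  match l with
  | [] => []
  | t :: ts => ts.foldl pickMax t

def moveR : List (Int × Int) := [(-1,-1),(-1,0),(-1,1),(0,1),(1,1),(1,0),(1,-1),(0,-1)]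

def R_direction (S_r : Int) (S_c : Int) (R_r : Int) (R_c : Int) : List Int :=
  let temp := moveR.foldl (fun temp p =>
    if R_r + p.1 - S_r = 0 ∧ R_c + p.2 - S_c = 0 then
      temp ++ [[0, p.1, p.2]]
    else
      temp ++ [[-(R_r + p.1 - S_r) ^ 2 - (R_c + p.2 - S_c) ^ 2, p.1, p.2]]) []
  PySem.List.slice (pyMax temp) (some 1) (some 3)

-- ===== PORT B =====
def R_direction_alt (S_r : Int) (S_c : Int) (R_r : Int) (R_c : Int) : List Int :=
  let dr : Int := (if S_r > R_r then 1 else 0) - (if S_r < R_r then 1 else 0)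
  let dc : Int := (if S_c > R_c then 1 else 0) - (if S_c < R_c then 1 else 0)
  if dr ≠ 0 ∨ dc ≠ 0 then [dr, dc] else [1, 0]

-- ===== PRECONDITION & SPEC =====
def Spec_R_direction (S_r : Int) (S_c : Int) (R_r : Int) (R_c : Int) (out : List Int) : Prop := out = R_direction_alt S_r S_c R_r R_c
instance (S_r : Int) (S_c : Int) (R_r : Int) (R_c : Int) (out : List Int) : Decidable (Spec_R_direction S_r S_c R_r R_c out) := by unfold Spec_R_direction; infer_instance

-- ===== CLAIM (what is proved, stated in full; the proofs are below) =====
def Claim_equal_R_direction : Prop := ∀ (S_r : Int) (S_c : Int) (R_r : Int) (R_c : Int), Dom_R_direction S_r S_c R_r R_c → Spec_R_direction S_r S_c R_r R_c (R_direction S_r S_c R_r R_c)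

-- ===== LEMMAS AND PROOFS =====

-- both branches of A's score record the same value (the hit branch's 0 is the distance there)
lemma entry_eq_append (t : List (List Int)) (u v dr dc : Int) :
    (if u = 0 ∧ v = 0 then t ++ [[(0 : Int), dr, dc]] else t ++ [[-u ^ 2 - v ^ 2, dr, dc]])
      = t ++ [[-u ^ 2 - v ^ 2, dr, dc]] := by
  split_ifs with h
  · rw [h.1, h.2]; norm_num
  · rfl

-- A's temp list, written out (scores unconditionally, by entry_eq_append)
def tempL (S_r : Int) (S_c : Int) (R_r : Int) (R_c : Int) : List (List Int) :=
  [[-(R_r + -1 - S_r) ^ 2 - (R_c + -1 - S_c) ^ 2, -1, -1],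
   [-(R_r + -1 - S_r) ^ 2 - (R_c + 0 - S_c) ^ 2, -1, 0],
   [-(R_r + -1 - S_r) ^ 2 - (R_c + 1 - S_c) ^ 2, -1, 1],
   [-(R_r + 0 - S_r) ^ 2 - (R_c + 1 - S_c) ^ 2, 0, 1],
   [-(R_r + 1 - S_r) ^ 2 - (R_c + 1 - S_c) ^ 2, 1, 1],
   [-(R_r + 1 - S_r) ^ 2 - (R_c + 0 - S_c) ^ 2, 1, 0],
   [-(R_r + 1 - S_r) ^ 2 - (R_c + -1 - S_c) ^ 2, 1, -1],
   [-(R_r + 0 - S_r) ^ 2 - (R_c + -1 - S_c) ^ 2, 0, -1]]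

lemma temp_eval (S_r : Int) (S_c : Int) (R_r : Int) (R_c : Int) :
    (moveR.foldl (fun temp p =>
      if R_r + p.1 - S_r = 0 ∧ R_c + p.2 - S_c = 0 then
        temp ++ [[0, p.1, p.2]]
      else
        temp ++ [[-(R_r + p.1 - S_r) ^ 2 - (R_c + p.2 - S_c) ^ 2, p.1, p.2]]) [])
      = tempL S_r S_c R_r R_c := by
  simp only [moveR, List.foldl_cons, List.foldl_nil, entry_eq_append,
    List.nil_append, List.cons_append, tempL]

lemma listLt_irrefl_aux : ∀ x : List Int, listLt x x = false := by
  intro x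
  induction x with
  | nil => simp [listLt]
  | cons a as ih => simp [listLt, ih]

lemma listLt_asymm : ∀ x y : List Int, listLt x y = true → listLt y x = false := by
  intro x
  induction x with
  | nil => intro y _; cases y <;> simp [listLt]
  | cons a as ih =>
    intro y h
    cases y with
    | nil => simp [listLt] at h
    | cons b bs =>
      simp only [listLt] at h ⊢
      split_ifs at h ⊢ <;> first | rfl | omega | exact ih bs h

lemma listLt_lt {a b : Int} {as bs : List Int} (h : a < b) :
    listLt (a :: as) (b :: bs) = true := by
  simp [listLt, h]

lemma listLt_eq {a b : Int} {as bs : List Int} (h : a = b) (ht : listLt as bs = true) :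
    listLt (a :: as) (b :: bs) = true := by
  simp [listLt, h, ht]

lemma foldl_pick_eq (e : List Int) :
    ∀ (l : List (List Int)) (init : List Int),
      (listLt init e = true ∨ init = e) →
      (∀ x ∈ l, listLt x e = true ∨ x = e) →
      (init = e ∨ e ∈ l) →
      l.foldl pickMax init = e := by
  intro l
  induction l with
  | nil =>
    intro init _ _ hmem
    rcases hmem with h | h
    · simpa using h
    · simp at h
  | cons y l ih =>
    intro init hinit hl hmem
    simp only [List.foldl_cons]
    have hy := hl y (by simp)
    have hl' : ∀ x ∈ l, listLt x e = true ∨ x = e := fun x hx => hl x (by simp [hx])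
    rcases hy with hy | hy
    · have hnew : listLt (pickMax init y) e = true ∨ pickMax init y = e := by
        unfold pickMax; split_ifs
        · exact Or.inl hy
        · exact hinit
      apply ih _ hnew hl'
      rcases hinit with hi | hi
      · rcases hmem with hm | hm
        · rw [hm, listLt_irrefl_aux] at hi; exact absurd hi (by simp)
        · rcases List.mem_cons.mp hm with hm | hm
          · rw [← hm, listLt_irrefl_aux] at hy; exact absurd hy (by simp)
          · exact Or.inr hm
      · left
        unfold pickMax
        rw [hi, listLt_asymm _ _ hy]
        simp
    · subst hy
      have hp : pickMax init y = y := by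
        unfold pickMax; split_ifs with h
        · rfl
        · rcases hinit with hi | hi
          · exact absurd hi h
          · exact hi
      rw [hp]
      exact ih _ (Or.inr rfl) hl' (Or.inl rfl)

lemma slice13 (s d c : Int) : PySem.List.slice [s, d, c] (some 1) (some 3) = [d, c] := rfl

-- ===== VERDICT (by name: the statement is the Claim_ definition above) =====
theorem R_direction_spec : Claim_equal_R_direction := by
  intro S_r S_c R_r R_c _
  unfold Spec_R_direction
  simp only [R_direction, R_direction_alt, temp_eval, tempL, pyMax]
  rcases lt_trichotomy S_r R_r with h1 | h1 | h1 <;>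
    rcases lt_trichotomy S_c R_c with h2 | h2 | h2
  · rw [foldl_pick_eq ([-(R_r + -1 - S_r) ^ 2 - (R_c + -1 - S_c) ^ 2, -1, -1])]
    · rw [slice13]; norm_num [gt_iff_lt, h1, h1.asymm, h2, h2.asymm]
    · exact Or.inr rfl
    · intro x hx
      simp only [List.mem_cons, List.not_mem_nil, or_false] at hx
      rcases hx with rfl | rfl | rfl | rfl | rfl | rfl | rfl <;>
        first
          | exact Or.inr rfl
          | (left; exact listLt_lt (by nlinarith [h1, h2]))
    · exact Or.inl rfl
  · rw [foldl_pick_eq ([-(R_r + -1 - S_r) ^ 2 - (R_c + 0 - S_c) ^ 2, -1, 0])]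
    · rw [slice13]; norm_num [gt_iff_lt, h1, h1.asymm, h2, lt_irrefl]
    · left; exact listLt_lt (by nlinarith [h1, h2])
    · intro x hx
      simp only [List.mem_cons, List.not_mem_nil, or_false] at hx
      rcases hx with rfl | rfl | rfl | rfl | rfl | rfl | rfl <;>
        first
          | exact Or.inr rfl
          | (left; exact listLt_lt (by nlinarith [h1, h2]))
    · right; simp
  · rw [foldl_pick_eq ([-(R_r + -1 - S_r) ^ 2 - (R_c + 1 - S_c) ^ 2, -1, 1])]
    · rw [slice13]; norm_num [gt_iff_lt, h1, h1.asymm, h2, h2.asymm]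
    · left; exact listLt_lt (by nlinarith [h1, h2])
    · intro x hx
      simp only [List.mem_cons, List.not_mem_nil, or_false] at hx
      rcases hx with rfl | rfl | rfl | rfl | rfl | rfl | rfl <;>
        first
          | exact Or.inr rfl
          | (left; exact listLt_lt (by nlinarith [h1, h2]))
    · right; simp
  · rw [foldl_pick_eq ([-(R_r + 0 - S_r) ^ 2 - (R_c + -1 - S_c) ^ 2, 0, -1])]
    · rw [slice13]; norm_num [gt_iff_lt, h1, lt_irrefl, h2, h2.asymm]
    · left; exact listLt_lt (by nlinarith [h1, h2])
    · intro x hx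
      simp only [List.mem_cons, List.not_mem_nil, or_false] at hx
      rcases hx with rfl | rfl | rfl | rfl | rfl | rfl | rfl <;>
        first
          | exact Or.inr rfl
          | (left; exact listLt_lt (by nlinarith [h1, h2]))
    · right; simp
  · rw [foldl_pick_eq ([-(R_r + 1 - S_r) ^ 2 - (R_c + 0 - S_c) ^ 2, 1, 0])]
    · rw [slice13]; norm_num [gt_iff_lt, h1, lt_irrefl, h2]
    · left; exact listLt_lt (by nlinarith [h1, h2])
    · intro x hx
      simp only [List.mem_cons, List.not_mem_nil, or_false] at hx
      rcases hx with rfl | rfl | rfl | rfl | rfl | rfl | rfl <;>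
        first
          | exact Or.inr rfl
          | (left; exact listLt_lt (by nlinarith [h1, h2]))
          | (left; exact listLt_eq (by rw [h1, h2]; ring) (by decide))
    · right; simp
  · rw [foldl_pick_eq ([-(R_r + 0 - S_r) ^ 2 - (R_c + 1 - S_c) ^ 2, 0, 1])]
    · rw [slice13]; norm_num [gt_iff_lt, h1, lt_irrefl, h2, h2.asymm]
    · left; exact listLt_lt (by nlinarith [h1, h2])
    · intro x hx
      simp only [List.mem_cons, List.not_mem_nil, or_false] at hx
      rcases hx with rfl | rfl | rfl | rfl | rfl | rfl | rfl <;>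
        first
          | exact Or.inr rfl
          | (left; exact listLt_lt (by nlinarith [h1, h2]))
    · right; simp
  · rw [foldl_pick_eq ([-(R_r + 1 - S_r) ^ 2 - (R_c + -1 - S_c) ^ 2, 1, -1])]
    · rw [slice13]; norm_num [gt_iff_lt, h1, h1.asymm, h2, h2.asymm]
    · left; exact listLt_lt (by nlinarith [h1, h2])
    · intro x hx
      simp only [List.mem_cons, List.not_mem_nil, or_false] at hx
      rcases hx with rfl | rfl | rfl | rfl | rfl | rfl | rfl <;>
        first
          | exact Or.inr rfl
          | (left; exact listLt_lt (by nlinarith [h1, h2]))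
    · right; simp
  · rw [foldl_pick_eq ([-(R_r + 1 - S_r) ^ 2 - (R_c + 0 - S_c) ^ 2, 1, 0])]
    · rw [slice13]; norm_num [gt_iff_lt, h1, h1.asymm, h2, lt_irrefl]
    · left; exact listLt_lt (by nlinarith [h1, h2])
    · intro x hx
      simp only [List.mem_cons, List.not_mem_nil, or_false] at hx
      rcases hx with rfl | rfl | rfl | rfl | rfl | rfl | rfl <;>
        first
          | exact Or.inr rfl
          | (left; exact listLt_lt (by nlinarith [h1, h2]))
    · right; simp
  · rw [foldl_pick_eq ([-(R_r + 1 - S_r) ^ 2 - (R_c + 1 - S_c) ^ 2, 1, 1])]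
    · rw [slice13]; norm_num [gt_iff_lt, h1, h1.asymm, h2, h2.asymm]
    · left; exact listLt_lt (by nlinarith [h1, h2])
    · intro x hx
      simp only [List.mem_cons, List.not_mem_nil, or_false] at hx
      rcases hx with rfl | rfl | rfl | rfl | rfl | rfl | rfl <;>
        first
          | exact Or.inr rfl
          | (left; exact listLt_lt (by nlinarith [h1, h2]))
    · right; simp
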